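-- pv_equiv track=rewrite | github.com/rookiedev07/AI-GONE-ROGUE | rounds/round1.py | embed_lawbreaker_keyword
-- ===== SOURCE A (Python) =====
-- def embed_lawbreaker_keyword(text: str) -> str:
--     keyword = "LAWBREAKEROVERRIDE"
--     result = []
--     keyword_index = 0
--
--     for char in text:
--         if (
--             keyword_index < len(keyword)
--             and char.lower() == keyword[keyword_index].lower()
--         ):
--             result.append(keyword[keyword_index])  # Capitalize
--             keyword_index += 1
--         else:
--             # Only lowercase or punctuation is allowed
--             if char.isalpha():
--                 result.append(char.lower())
--             else:
--                 result.append(char)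
--
--     # If keyword wasn't fully embedded, pad it in
--     while keyword_index < len(keyword):
--         result.append(" " + keyword[keyword_index])
--         keyword_index += 1
--
--     return "".join(result)
-- ===== SOURCE B (Python) =====
-- def embed_lawbreaker_keyword(text: str) -> str:
--     keyword = "LAWBREAKEROVERRIDE"
--     low = text.lower()
--     # Keyword-driven matching: for each keyword char in order, locate its next
--     # case-insensitive occurrence in the text with str.find from a moving
--     # cursor; record position -> keyword char.  (Greedy subsequence embedding
--     # found keyword-first instead of scanning the text char by char.)
--     pos = {}
--     cursor = 0
--     matched = 0
--     for kc in keyword: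
--         i = low.find(kc.lower(), cursor)
--         if i < 0:
--             break
--         pos[i] = kc
--         cursor = i + 1
--         matched += 1
--     out = []
--     for i, ch in enumerate(text):
--         if i in pos:
--             out.append(pos[i])
--         elif ch.isalpha():
--             out.append(ch.lower())
--         else:
--             out.append(ch)
--     out.extend(" " + c for c in keyword[matched:])
--     return "".join(out)
-- ===== Notes on version B (the rewrite author's own statement) =====
-- stated objective: alternative
-- what changed: B inverts the traversal: instead of A's single text-driven scan carrying a keyword index, B iterates over the KEYWORD, using str.find with a moving cursor on the lowered text to locate each keyword character's greedy position into a position->char dict, then renders the text positions from that dict and pads from keyword[matched:].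
import Mathlib
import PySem

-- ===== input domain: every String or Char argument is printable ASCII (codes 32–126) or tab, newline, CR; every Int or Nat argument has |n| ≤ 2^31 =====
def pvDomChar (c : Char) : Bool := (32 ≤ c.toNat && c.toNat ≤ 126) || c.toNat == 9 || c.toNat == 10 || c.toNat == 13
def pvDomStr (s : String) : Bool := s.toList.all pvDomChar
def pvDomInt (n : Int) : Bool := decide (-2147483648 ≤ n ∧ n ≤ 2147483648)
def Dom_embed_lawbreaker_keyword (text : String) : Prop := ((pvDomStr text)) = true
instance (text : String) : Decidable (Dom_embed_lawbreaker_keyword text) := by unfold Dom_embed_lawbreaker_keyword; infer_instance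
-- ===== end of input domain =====

-- B inverts A's traversal: it iterates over the keyword, locating each keyword
-- character with find-from-cursor on the lowered text, then renders the text
-- from the resulting position dict (alternative decomposition, same cost).

-- the keyword constant shared by both sources
def pvKw : List Char := "LAWBREAKEROVERRIDE".toList

-- ===== PORT A =====
-- loop body of A's for-loop: state (result, keyword_index)
def pvAstep (st : List (List Char) × Nat) (ch : Char) : List (List Char) × Nat :=
  if st.2 < pvKw.length && (PySem.Chars.lowerChar ch == PySem.Chars.lowerChar (pvKw.getD st.2 ' ')) then
    (st.1 ++ [[pvKw.getD st.2 ' ']], st.2 + 1)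
  else if PySem.Chars.isalpha ch then
    (st.1 ++ [[PySem.Chars.lowerChar ch]], st.2)
  else
    (st.1 ++ [[ch]], st.2)

-- A's trailing while-loop, run over the unmatched keyword tail
def pvAwhile : List Char → List (List Char) → List (List Char)
  | [], res => res
  | c :: cs, res => pvAwhile cs (res ++ [[' ', c]])

def embed_lawbreaker_keyword (text : String) : String :=
  let st := text.toList.foldl pvAstep ([], 0)
  String.mk (PySem.Chars.join [] (pvAwhile (pvKw.drop st.2) st.1))

-- ===== PORT B =====
-- low.find(t, cursor) for a single-char needle t: exact port of str.find with a
-- start argument (0 ≤ cursor; cursor past the end yields no hit, like CPython);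
-- none plays the role of -1 (Source B breaks on i < 0).
def pvFindFrom : List Char → Char → Nat → Option Nat
  | [], _, _ => none
  | x :: xs, t, i => if x == t then some i else pvFindFrom xs t (i + 1)

-- Source B's keyword loop: for kc in keyword: i = low.find(kc.lower(), cursor); on
-- failure break, else pos[i] = kc, cursor = i+1, matched += 1.  Returns (pos, matched).
def pvBfloop (low : List Char) : List Char → Nat → List (Nat × Char) × Nat
  | [], _ => ([], 0)
  | kc :: ks, cursor =>
    match pvFindFrom (low.drop cursor) (PySem.Chars.lowerChar kc) cursor with
    | none => ([], 0)
    | some i =>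
      let r := pvBfloop low ks (i + 1)
      ((i, kc) :: r.1, r.2 + 1)

-- Source B's rendering loop over enumerate(text), looking indices up in pos
def pvBrendLoop (pos : List (Nat × Char)) : List Char → Nat → List Char
  | [], _ => []
  | c :: cs, i =>
    (match pos.lookup i with
     | some m => m
     | none => if PySem.Chars.isalpha c then PySem.Chars.lowerChar c else c) :: pvBrendLoop pos cs (i + 1)

def embed_lawbreaker_keyword_alt (text : String) : String :=
  let low := PySem.Chars.lower text.toList
  let fm := pvBfloop low pvKw 0
  String.mk (pvBrendLoop fm.1 text.toList 0 ++ (pvKw.drop fm.2).flatMap (fun c => [' ', c]))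

-- ===== PRECONDITION & SPEC =====
def Spec_embed_lawbreaker_keyword (text : String) (out : String) : Prop := out = embed_lawbreaker_keyword_alt text
instance (text : String) (out : String) : Decidable (Spec_embed_lawbreaker_keyword text out) := by unfold Spec_embed_lawbreaker_keyword; infer_instance

-- ===== CLAIM (what is proved, stated in full; the proofs are below) =====
def Claim_equal_embed_lawbreaker_keyword : Prop := ∀ (text : String), Dom_embed_lawbreaker_keyword text → Spec_embed_lawbreaker_keyword text (embed_lawbreaker_keyword text)

-- ===== LEMMAS AND PROOFS =====

-- proof-side reformulation of pvBfloop that passes the text SUFFIX explicitly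
def pvFL : List Char → List Char → Nat → List (Nat × Char) × Nat
  | _, [], _ => ([], 0)
  | ls, kc :: ks, off =>
    match pvFindFrom ls (PySem.Chars.lowerChar kc) off with
    | none => ([], 0)
    | some i =>
      let r := pvFL (ls.drop (i + 1 - off)) ks (i + 1)
      ((i, kc) :: r.1, r.2 + 1)

lemma pvFindFrom_ge {ls : List Char} {t : Char} {i j : Nat}
    (h : pvFindFrom ls t i = some j) : i ≤ j := by
  induction ls generalizing i with
  | nil => simp [pvFindFrom] at h
  | cons x xs ih =>
      by_cases hx : (x == t) = true
      · simp [pvFindFrom, hx] at h; omega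
      · simp only [pvFindFrom, hx, Bool.false_eq_true, if_false] at h
        have := ih h; omega

lemma pvBfloop_eq_pvFL (low : List Char) (ks : List Char) (cursor : Nat) :
    pvBfloop low ks cursor = pvFL (low.drop cursor) ks cursor := by
  induction ks generalizing cursor with
  | nil => rfl
  | cons kc ks ih =>
      simp only [pvBfloop, pvFL]
      cases h : pvFindFrom (low.drop cursor) (PySem.Chars.lowerChar kc) cursor with
      | none => rfl
      | some i =>
          have hci : cursor ≤ i := pvFindFrom_ge h
          have hdrop : (low.drop cursor).drop (i + 1 - cursor) = low.drop (i + 1) := by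
            rw [List.drop_drop]; congr 1; omega
          simp only [ih (i + 1), hdrop]

lemma pvFL_keys_ge (ls : List Char) (ks : List Char) (off : Nat) :
    ∀ p ∈ (pvFL ls ks off).1, off ≤ p.1 := by
  induction ks generalizing ls off with
  | nil => intro p hp; simp [pvFL] at hp
  | cons kc ks ih =>
      intro p hp
      simp only [pvFL] at hp
      cases h : pvFindFrom ls (PySem.Chars.lowerChar kc) off with
      | none => rw [h] at hp; simp at hp
      | some i =>
          rw [h] at hp
          have hoi : off ≤ i := pvFindFrom_ge h
          simp only [List.mem_cons] at hp
          rcases hp with hp | hp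
          · subst hp; exact hoi
          · have := ih _ (i + 1) p hp; omega

lemma pvLookup_none {P : List (Nat × Char)} {i : Nat}
    (h : ∀ p ∈ P, i < p.1) : P.lookup i = none := by
  induction P with
  | nil => rfl
  | cons q Q ih =>
      have hq : i < q.1 := h q (by simp)
      have hne : (i == q.1) = false := beq_eq_false_iff_ne.mpr (by omega)
      cases q with
      | mk a b =>
          simp only [List.lookup]
          simp only [hne]
          exact ih (fun p hp => h p (by simp [hp]))

lemma pvRend_skip (j : Nat) (v : Char) (P : List (Nat × Char)) (cs : List Char) (i : Nat)
    (hj : j < i) : pvBrendLoop ((j, v) :: P) cs i = pvBrendLoop P cs i := by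
  induction cs generalizing i with
  | nil => rfl
  | cons c cs ih =>
      have hne : (i == j) = false := beq_eq_false_iff_ne.mpr (by omega)
      simp only [pvBrendLoop, List.lookup, hne]
      rw [ih (i + 1) (by omega)]

lemma pvFL_nil (ks : List Char) (off : Nat) : pvFL [] ks off = ([], 0) := by
  cases ks <;> rfl

lemma pvFL_kw_nil (ls : List Char) (off : Nat) : pvFL ls [] off = ([], 0) := rfl

-- head-mismatch shift: when the first text char does not match the current
-- keyword target, the find loop behaves as if started one position later
lemma pvFL_shift (x : Char) (ls : List Char) (kc : Char) (ks : List Char) (off : Nat)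
    (h : (x == PySem.Chars.lowerChar kc) = false) :
    pvFL (x :: ls) (kc :: ks) off = pvFL ls (kc :: ks) (off + 1) := by
  simp only [pvFL, pvFindFrom, h, Bool.false_eq_true, if_false]
  cases hf : pvFindFrom ls (PySem.Chars.lowerChar kc) (off + 1) with
  | none => rfl
  | some i =>
      have : off + 1 ≤ i := pvFindFrom_ge hf
      have hdrop : (x :: ls).drop (i + 1 - off) = ls.drop (i + 1 - (off + 1)) := by
        have h1 : i + 1 - off = (i + 1 - (off + 1)) + 1 := by omega
        rw [h1, List.drop_succ_cons]
      simp only [hdrop]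

-- the main invariant: A's fold over a text suffix starting at absolute index
-- off with keyword index k equals B's find loop + renderer on that suffix
lemma pvMain (cs : List Char) (k off : Nat) (res : List (List Char)) :
    cs.foldl pvAstep (res, k)
      = (res ++ (pvBrendLoop (pvFL (cs.map PySem.Chars.lowerChar) (pvKw.drop k) off).1 cs off).map (fun c => [c]),
         k + (pvFL (cs.map PySem.Chars.lowerChar) (pvKw.drop k) off).2) := by
  induction cs generalizing k off res with
  | nil => simp [pvFL_nil, pvBrendLoop]
  | cons c cs ih =>
      by_cases hk : k < pvKw.length
      · have hdrop : pvKw.drop k = pvKw.getD k ' ' :: pvKw.drop (k + 1) := by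
          rw [List.getD_eq_getElem pvKw ' ' hk]
          exact (List.getElem_cons_drop hk).symm
        by_cases hc : (PySem.Chars.lowerChar c == PySem.Chars.lowerChar (pvKw.getD k ' ')) = true
        · -- match: both sides consume keyword char k at position off
          have hc' : PySem.Chars.lowerChar c = PySem.Chars.lowerChar (pvKw.getD k ' ') :=
            beq_iff_eq.mp hc
          have hstep : pvAstep (res, k) c = (res ++ [[pvKw.getD k ' ']], k + 1) := by
            simp [pvAstep, hk, hc']
          have hFL : pvFL ((c :: cs).map PySem.Chars.lowerChar) (pvKw.drop k) off
              = ((off, pvKw.getD k ' ') :: (pvFL (cs.map PySem.Chars.lowerChar) (pvKw.drop (k + 1)) (off + 1)).1,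
                 (pvFL (cs.map PySem.Chars.lowerChar) (pvKw.drop (k + 1)) (off + 1)).2 + 1) := by
            rw [hdrop]
            simp only [List.map_cons, pvFL, pvFindFrom, hc, if_true]
            have : off + 1 - off = 1 := by omega
            simp only [this, List.drop_succ_cons, List.drop_zero]
          rw [List.foldl_cons, hstep, ih (k + 1) (off + 1), hFL]
          simp only [pvBrendLoop, List.lookup, beq_self_eq_true]
          rw [pvRend_skip off _ _ cs (off + 1) (by omega)]
          simp [List.append_assoc]
          omega
        · -- mismatch with keyword remaining: A renders c plainly, B's finds skip it
          have hstep : pvAstep (res, k)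
              c = (res ++ [[if PySem.Chars.isalpha c then PySem.Chars.lowerChar c else c]], k) := by
            simp only [pvAstep, hc, Bool.and_false, Bool.false_eq_true, if_false]
            split_ifs with ha <;> simp
          have hFL : pvFL ((c :: cs).map PySem.Chars.lowerChar) (pvKw.drop k) off
              = pvFL (cs.map PySem.Chars.lowerChar) (pvKw.drop k) (off + 1) := by
            rw [hdrop, List.map_cons, pvFL_shift _ _ _ _ _ (by simpa using hc), ← hdrop]
          have hkeys := pvFL_keys_ge (cs.map PySem.Chars.lowerChar) (pvKw.drop k) (off + 1)
          have hlk : ((pvFL (cs.map PySem.Chars.lowerChar) (pvKw.drop k) (off + 1)).1).lookup off = none :=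
            pvLookup_none (fun p hp => by have := hkeys p hp; omega)
          rw [List.foldl_cons, hstep, ih k (off + 1), hFL]
          simp only [pvBrendLoop, hlk]
          simp [List.append_assoc]
      · -- keyword exhausted: A never matches again, B's pos is empty
        have hnil : pvKw.drop k = [] := List.drop_eq_nil_of_le (by omega)
        have hstep : pvAstep (res, k)
            c = (res ++ [[if PySem.Chars.isalpha c then PySem.Chars.lowerChar c else c]], k) := by
          simp only [pvAstep]
          have : (decide (k < pvKw.length)) = false := by simp; omega
          simp only [this, Bool.false_and, Bool.false_eq_true, if_false]
          split_ifs with ha <;> simp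
        rw [List.foldl_cons, hstep, ih k (off + 1)]
        simp only [hnil, pvFL_kw_nil, pvBrendLoop, List.lookup]
        simp [List.append_assoc]

-- joining with the empty separator is flattening
lemma pvJoin_nil_flatten (l : List (List Char)) :
    PySem.Chars.join [] l = l.flatten := by
  match l with
  | [] => simp [PySem.Chars.join_nil]
  | [p] => simp [PySem.Chars.join_singleton]
  | p :: q :: r =>
      rw [PySem.Chars.join_cons_cons, pvJoin_nil_flatten (q :: r)]
      simp

-- A's while-loop appends the pad tokens after the accumulated result
lemma pvAwhile_join (ks : List Char) (res : List (List Char)) :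
    PySem.Chars.join [] (pvAwhile ks res)
      = PySem.Chars.join [] res ++ ks.flatMap (fun c => [' ', c]) := by
  induction ks generalizing res with
  | nil => simp [pvAwhile]
  | cons c cs ih =>
      rw [pvAwhile, ih]
      simp [pvJoin_nil_flatten]

lemma pvLower_eq_map (cs : List Char) :
    PySem.Chars.lower cs = cs.map PySem.Chars.lowerChar := rfl

-- ===== VERDICT (by name: the statement is the Claim_ definition above) =====
theorem embed_lawbreaker_keyword_spec : Claim_equal_embed_lawbreaker_keyword := by
  intro text _
  unfold Spec_embed_lawbreaker_keyword embed_lawbreaker_keyword embed_lawbreaker_keyword_alt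
  simp only [pvBfloop_eq_pvFL, List.drop_zero, pvLower_eq_map]
  rw [show (0 : Nat) = 0 from rfl]
  have h := pvMain text.toList 0 0 []
  rw [show pvKw.drop 0 = pvKw from List.drop_zero] at h
  simp only [h, pvAwhile_join, List.nil_append, Nat.zero_add]
  rw [PySem.Chars.join_nil_singletons]
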